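-- pv_equiv track=rewrite | github.com/Ammar282828/FYP2026 | utils/filters.py | filter_and_normalize_entities
-- ===== SOURCE A (Python) =====
-- from typing import List, Dict, Optional
--
-- def filter_and_normalize_entities(entities) -> List[Dict]:
--     # removes noise entities and combines similar ones
--     # like combining "Pakistani" and "Pakistan" into one
--     if not entities or entities == '[]':
--         return []
--
--     NOISE_WORDS = {
--         'one', 'two', 'three', 'four', 'five', 'six', 'seven', 'eight', 'nine', 'ten',
--         'first', 'second', 'third', 'last', 'next', 'today', 'yesterday', 'tomorrow',
--         'this', 'that', 'these', 'those', 'the', 'a', 'an', 'and', 'or', 'but',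
--         'monday', 'tuesday', 'wednesday', 'thursday', 'friday', 'saturday', 'sunday',
--         'jan', 'feb', 'mar', 'apr', 'may', 'jun', 'jul', 'aug', 'sep', 'oct', 'nov', 'dec'
--     }
--
--     filtered = []
--     seen_normalized = {}
--
--     for entity in entities:
--         text = entity.get('text', '').strip()
--         entity_type = entity.get('type', '')
--
--         if not text or len(text) < 2:
--             continue
--
--         if text.isdigit():
--             continue
--
--         if text.lower() in NOISE_WORDS:
--             continue
--
--         if not any(c.isalnum() for c in text):
--             continue
--
--         if entity_type in ['DATE', 'TIME', 'CARDINAL', 'ORDINAL', 'MONEY', 'PERCENT', 'QUANTITY']: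
--             continue
--
--         normalized = text.lower().rstrip('s')
--
--         if normalized in seen_normalized:
--             existing = seen_normalized[normalized]
--             if len(text) > len(existing['text']):
--                 seen_normalized[normalized] = entity
--         else:
--             seen_normalized[normalized] = entity
--
--     return list(seen_normalized.values())
-- ===== SOURCE B (Python) =====
-- # Group-then-reduce re-implementation: bucket surviving entities per normalized key,
-- # then pick each bucket's winner in a second pass (same winner rule as the original:
-- # a later entity wins only if its stripped text is strictly longer than the raw
-- # stored text of the current best).
--
-- NOISE_WORDS = frozenset({
--     'one', 'two', 'three', 'four', 'five', 'six', 'seven', 'eight', 'nine', 'ten',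
--     'first', 'second', 'third', 'last', 'next', 'today', 'yesterday', 'tomorrow',
--     'this', 'that', 'these', 'those', 'the', 'a', 'an', 'and', 'or', 'but',
--     'monday', 'tuesday', 'wednesday', 'thursday', 'friday', 'saturday', 'sunday',
--     'jan', 'feb', 'mar', 'apr', 'may', 'jun', 'jul', 'aug', 'sep', 'oct', 'nov', 'dec'
-- })
--
-- SKIP_TYPES = frozenset({'DATE', 'TIME', 'CARDINAL', 'ORDINAL', 'MONEY', 'PERCENT', 'QUANTITY'})
--
--
-- def _keep(text, entity_type):
--     return (len(text) >= 2
--             and not text.isdigit()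
--             and text.lower() not in NOISE_WORDS
--             and any(c.isalnum() for c in text)
--             and entity_type not in SKIP_TYPES)
--
--
-- def _best(group):
--     best = group[0]
--     for e in group[1:]:
--         if len(e.get('text', '').strip()) > len(best.get('text', '')):
--             best = e
--     return best
--
--
-- def filter_and_normalize_entities(entities):
--     if not entities:
--         return []
--     groups = {}
--     for entity in entities:
--         text = entity.get('text', '').strip()
--         if _keep(text, entity.get('type', '')):
--             groups.setdefault(text.lower().rstrip('s'), []).append(entity)
--     return [_best(g) for g in groups.values()]
-- ===== Notes on version B (the rewrite author's own statement) =====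
-- stated objective: alternative
-- what changed: Replaces the inline incumbent-updating dict (one running best entity per normalized key) with a group-then-reduce shape: a dict of lists collecting all surviving entities per normalized key, then a second pass reducing each group to its winner.
import Mathlib
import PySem

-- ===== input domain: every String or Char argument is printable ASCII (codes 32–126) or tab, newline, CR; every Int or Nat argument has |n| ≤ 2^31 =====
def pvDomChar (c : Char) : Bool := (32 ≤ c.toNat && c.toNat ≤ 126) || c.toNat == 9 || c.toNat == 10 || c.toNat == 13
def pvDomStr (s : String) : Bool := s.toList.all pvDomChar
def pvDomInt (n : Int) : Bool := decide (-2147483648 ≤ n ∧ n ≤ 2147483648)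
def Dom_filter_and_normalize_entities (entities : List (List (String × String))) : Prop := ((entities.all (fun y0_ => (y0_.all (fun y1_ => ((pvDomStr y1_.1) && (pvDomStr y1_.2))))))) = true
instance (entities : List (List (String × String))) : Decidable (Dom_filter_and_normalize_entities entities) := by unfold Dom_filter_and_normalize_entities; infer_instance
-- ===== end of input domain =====

-- B groups surviving entities per normalized key in a dict of lists and reduces each
-- group to one entity in a second pass, instead of A's inline one-best-per-key dict
-- (objective: alternative decomposition, same cost).

-- ===== PORT A =====
def pvNoise : List String := ["one", "two", "three", "four", "five", "six", "seven", "eight", "nine", "ten",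
  "first", "second", "third", "last", "next", "today", "yesterday", "tomorrow",
  "this", "that", "these", "those", "the", "a", "an", "and", "or", "but",
  "monday", "tuesday", "wednesday", "thursday", "friday", "saturday", "sunday",
  "jan", "feb", "mar", "apr", "may", "jun", "jul", "aug", "sep", "oct", "nov", "dec"]

def pvSkipTypes : List String := ["DATE", "TIME", "CARDINAL", "ORDINAL", "MONEY", "PERCENT", "QUANTITY"]

-- exact port of Python's str.rstrip('s') (PySem.Chars.rstrip strips whitespace only)
def pvRstripS (s : String) : String := String.ofList ((s.toList.reverse.dropWhile (· == 's')).reverse)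

-- A's loop body, literally (a named helper for the fold)
def pvStepA (seen : PySem.Dict String (List (String × String))) (entity : List (String × String)) :
    PySem.Dict String (List (String × String)) :=
  let text := PySem.Str.strip ((PySem.Dict.mk entity).getD "text" "")
  let etype := (PySem.Dict.mk entity).getD "type" ""
  if text == "" || decide (PySem.Str.len text < 2) then seen
  else if PySem.Str.strIsdigit text then seen
  else if pvNoise.contains (PySem.Str.lower text) then seen
  else if !(text.toList.any PySem.Chars.isalnum) then seen
  else if pvSkipTypes.contains etype then seen
  else
    let normalized := pvRstripS (PySem.Str.lower text)
    if seen.contains normalized then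
      -- existing['text']: KeyError unreachable (every stored entity passed the non-empty-text guard); ported with default ""
      let existing := seen.getD normalized []
      if decide (PySem.Str.len ((PySem.Dict.mk existing).getD "text" "") < PySem.Str.len text) then
        seen.insert normalized entity
      else seen
    else seen.insert normalized entity

def filter_and_normalize_entities (entities : List (List (String × String))) : List (List (String × String)) :=
  -- the source's `entities == '[]'` compares a list with a string: always False for a list input, omitted
  if entities = [] then []
  else (entities.foldl pvStepA PySem.Dict.empty).values

-- ===== PORT B =====
def pvKeep (text : String) (etype : String) : Bool :=
  !(decide (PySem.Str.len text < 2)) && !(PySem.Str.strIsdigit text) &&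
    !(pvNoise.contains (PySem.Str.lower text)) && (text.toList.any PySem.Chars.isalnum) &&
    !(pvSkipTypes.contains etype)

-- port of _best: group[0] is unreachable on [] (collected groups are nonempty)
def pvBest (group : List (List (String × String))) : List (String × String) :=
  match group with
  | [] => []
  | b :: rest =>
    rest.foldl (fun best e =>
      if decide (PySem.Str.len ((PySem.Dict.mk best).getD "text" "") <
          PySem.Str.len (PySem.Str.strip ((PySem.Dict.mk e).getD "text" ""))) then e else best) b

-- B's loop body (a named helper for the fold)
def pvStepB (g : PySem.Dict String (List (List (String × String)))) (entity : List (String × String)) :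
    PySem.Dict String (List (List (String × String))) :=
  let text := PySem.Str.strip ((PySem.Dict.mk entity).getD "text" "")
  if pvKeep text ((PySem.Dict.mk entity).getD "type" "") then
    (g.modify (pvRstripS (PySem.Str.lower text)) [] (· ++ [entity]))
  else g

def filter_and_normalize_entities_alt (entities : List (List (String × String))) : List (List (String × String)) :=
  if entities = [] then []
  else ((entities.foldl pvStepB PySem.Dict.empty).values).map pvBest

-- ===== PRECONDITION & SPEC =====
def Spec_filter_and_normalize_entities (entities : List (List (String × String))) (out : List (List (String × String))) : Prop := out = filter_and_normalize_entities_alt entities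
instance (entities : List (List (String × String))) (out : List (List (String × String))) : Decidable (Spec_filter_and_normalize_entities entities out) := by unfold Spec_filter_and_normalize_entities; infer_instance

-- ===== CLAIM (what is proved, stated in full; the proofs are below) =====
def Claim_equal_filter_and_normalize_entities : Prop := ∀ (entities : List (List (String × String))), Dom_filter_and_normalize_entities entities → Spec_filter_and_normalize_entities entities (filter_and_normalize_entities entities)

-- ===== LEMMAS AND PROOFS =====

-- the simulation relation between A's dict of bests and B's dict of groups
def pvRel (d : PySem.Dict String (List (String × String)))
    (g : PySem.Dict String (List (List (String × String)))) : Prop :=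
  d.items = g.items.map (fun p => (p.1, pvBest p.2)) ∧
  (g.items.map Prod.fst).Nodup ∧
  ∀ p ∈ g.items, p.2 ≠ []

theorem pvBest_append (v : List (List (String × String))) (hv : v ≠ [])
    (e : List (String × String)) :
    pvBest (v ++ [e]) =
      if decide (PySem.Str.len ((PySem.Dict.mk (pvBest v)).getD "text" "") <
          PySem.Str.len (PySem.Str.strip ((PySem.Dict.mk e).getD "text" ""))) then e
      else pvBest v := by
  match v with
  | [] => exact absurd rfl hv
  | b :: rest => simp [pvBest, List.foldl_append]

-- the core update step: A's conditional one-best insert vs B's group append, at key n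
theorem pvRel_update (d : PySem.Dict String (List (String × String)))
    (g : PySem.Dict String (List (List (String × String))))
    (h : pvRel d g) (e : List (String × String)) (n : String) :
    pvRel
      (if d.contains n = true then
        (if decide (PySem.Str.len ((PySem.Dict.mk (d.getD n [])).getD "text" "") <
            PySem.Str.len (PySem.Str.strip ((PySem.Dict.mk e).getD "text" ""))) = true then
          d.insert n e
        else d)
      else d.insert n e)
      (g.modify n [] (· ++ [e])) := by
  obtain ⟨hit, hnd, hne⟩ := h
  have hcont : d.contains n = g.contains n := by
    rw [PySem.Dict.contains, PySem.Dict.contains, hit, List.any_map]; rfl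
  rw [PySem.Dict.modify]
  by_cases hc : g.contains n = true
  · have hfind : (g.items.find? (fun p => p.1 == n)).isSome = true := by
      rw [List.find?_isSome]
      obtain ⟨q, hq1, hq2⟩ := List.any_eq_true.mp hc
      exact ⟨q, hq1, hq2⟩
    obtain ⟨q, hq⟩ := Option.isSome_iff_exists.mp hfind
    have hqmem : q ∈ g.items := List.mem_of_find?_eq_some hq
    have hqk := List.find?_some hq
    have hqkey : q.1 = n := eq_of_beq (by simpa using hqk)
    have hgget : g.getD n [] = q.2 := by
      rw [PySem.Dict.getD, PySem.Dict.get?, hq]; rfl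
    have hdget : d.getD n [] = pvBest q.2 := by
      rw [PySem.Dict.getD, PySem.Dict.get?, hit, List.find?_map]
      show ((Option.map (fun (p : String × List (List (String × String))) =>
          (p.1, pvBest p.2)) (g.items.find? (fun p => p.1 == n))).map
            (fun x => x.2)).getD [] = pvBest q.2
      rw [hq]
      rfl
    have hq2ne : q.2 ≠ [] := hne q hqmem
    have huniq : ∀ p ∈ g.items, p.1 = n → p = q := fun p hp hpn =>
      List.inj_on_of_nodup_map hnd hp hqmem (by show p.1 = q.1; rw [hpn, hqkey])
    have hdc : d.contains n = true := by rw [hcont]; exact hc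
    have hgins : (g.insert n (g.getD n [] ++ [e])).items
        = g.items.map (fun p => if p.1 == n then (n, q.2 ++ [e]) else p) := by
      rw [PySem.Dict.insert, if_pos hc, hgget]
    have hdins : (d.insert n e).items
        = d.items.map (fun p => if p.1 == n then (n, e) else p) := by
      rw [PySem.Dict.insert, if_pos hdc]
    have hfst : (Prod.fst ∘ (fun (p : String × List (List (String × String))) =>
        if p.1 == n then (n, q.2 ++ [e]) else p)) = Prod.fst := by
      funext p
      by_cases hpn : (p.1 == n) = true
      · simp only [Function.comp_apply, if_pos hpn]
        exact (eq_of_beq hpn).symm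
      · simp only [Function.comp_apply, if_neg hpn]
    have hkeys : ((g.insert n (g.getD n [] ++ [e])).items.map Prod.fst).Nodup := by
      rw [hgins, List.map_map, hfst]
      exact hnd
    have hval : ∀ p ∈ (g.insert n (g.getD n [] ++ [e])).items, p.2 ≠ [] := by
      rw [hgins]
      intro p hp
      obtain ⟨p', hp', rfl⟩ := List.mem_map.mp hp
      by_cases hpn : (p'.1 == n) = true
      · simp only [if_pos hpn]
        exact fun hcontr => absurd hcontr (by simp)
      · simp only [if_neg hpn]
        exact hne p' hp'
    rw [if_pos hdc, hdget]
    by_cases hcnd : decide (PySem.Str.len ((PySem.Dict.mk (pvBest q.2)).getD "text" "") <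
        PySem.Str.len (PySem.Str.strip ((PySem.Dict.mk e).getD "text" ""))) = true
    · rw [if_pos hcnd]
      refine ⟨?_, hkeys, hval⟩
      rw [hdins, hit, hgins, List.map_map, List.map_map]
      refine List.map_congr_left (fun p hp => ?_)
      by_cases hpn : (p.1 == n) = true
      · have hpq : p = q := huniq p hp (eq_of_beq hpn)
        subst hpq
        simp only [Function.comp_apply, if_pos hpn]
        rw [pvBest_append p.2 hq2ne e, if_pos hcnd]
      · simp only [Function.comp_apply, if_neg hpn]
    · rw [if_neg hcnd]
      refine ⟨?_, hkeys, hval⟩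
      rw [hit, hgins, List.map_map]
      refine List.map_congr_left (fun p hp => ?_)
      by_cases hpn : (p.1 == n) = true
      · have hpq : p = q := huniq p hp (eq_of_beq hpn)
        subst hpq
        simp only [Function.comp_apply, if_pos hpn]
        rw [pvBest_append p.2 hq2ne e, if_neg hcnd, hqkey]
      · simp only [Function.comp_apply, if_neg hpn]
  · have hc0 : g.contains n = false := by
      rcases hbb : g.contains n with _ | _
      · rfl
      · exact absurd hbb hc
    have hdc : d.contains n = false := by rw [hcont]; exact hc0
    have hgget : g.getD n [] = [] := by
      rw [PySem.Dict.getD, PySem.Dict.get?, List.find?_eq_none.mpr ?_]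
      · rfl
      · intro p hp hpn
        rw [PySem.Dict.contains] at hc
        exact hc (List.any_eq_true.mpr ⟨p, hp, hpn⟩)
    have hnmem : n ∉ g.items.map Prod.fst := by
      rw [PySem.Dict.contains] at hc
      intro hmem
      obtain ⟨p, hp, hpn⟩ := List.mem_map.mp hmem
      exact hc (List.any_eq_true.mpr ⟨p, hp, beq_iff_eq.mpr hpn⟩)
    rw [if_neg (by rw [hdc]; exact Bool.false_ne_true), PySem.Dict.insert,
      if_neg (by rw [hdc]; exact Bool.false_ne_true), PySem.Dict.insert,
      if_neg (by rw [hc0]; exact Bool.false_ne_true), hgget]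
    refine ⟨?_, ?_, ?_⟩
    · show d.items ++ [(n, e)]
        = (g.items ++ [(n, [] ++ [e])]).map
            (fun (p : String × List (List (String × String))) => (p.1, pvBest p.2))
      rw [List.map_append, hit]
      rfl
    · show ((g.items ++ [(n, [] ++ [e])]).map Prod.fst).Nodup
      rw [List.map_append]
      refine List.Nodup.append hnd (by simp) ?_
      intro a ha hb
      simp only [List.map_cons, List.map_nil, List.mem_singleton] at hb
      subst hb
      exact hnmem ha
    · intro p hp
      rcases List.mem_append.mp hp with hp | hp
      · exact hne p hp
      · simp only [List.mem_singleton] at hp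
        subst hp
        simp

theorem pvRel_step (d : PySem.Dict String (List (String × String)))
    (g : PySem.Dict String (List (List (String × String))))
    (e : List (String × String)) (h : pvRel d g) : pvRel (pvStepA d e) (pvStepB g e) := by
  simp only [pvStepA, pvStepB]
  set text := PySem.Str.strip ((PySem.Dict.mk e).getD "text" "") with htext
  set etype := (PySem.Dict.mk e).getD "type" "" with hetype
  by_cases h1 : (text == "" || decide (PySem.Str.len text < 2)) = true
  · have hlen : decide (PySem.Str.len text < 2) = true := by
      rcases Bool.or_eq_true_iff.mp h1 with hb | hb
      · rw [eq_of_beq hb]; decide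
      · exact hb
    have hk : pvKeep text etype = false := by
      simp only [pvKeep, hlen, Bool.not_true, Bool.false_and]
    rw [if_pos h1, if_neg (by rw [hk]; exact Bool.false_ne_true)]
    exact h
  · have hb1 : decide (PySem.Str.len text < 2) = false := by
      rcases hbb : decide (PySem.Str.len text < 2) with _ | _
      · rfl
      · exact absurd (by rw [hbb, Bool.or_true]) h1
    rw [if_neg h1]
    by_cases h2 : PySem.Str.strIsdigit text = true
    · have hk : pvKeep text etype = false := by
        simp only [pvKeep, h2, Bool.not_true, Bool.false_and, Bool.and_false]
      rw [if_pos h2, if_neg (by rw [hk]; exact Bool.false_ne_true)]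
      exact h
    · rw [if_neg h2]
      by_cases h3 : pvNoise.contains (PySem.Str.lower text) = true
      · have hk : pvKeep text etype = false := by
          simp only [pvKeep, h3, Bool.not_true, Bool.false_and, Bool.and_false]
        rw [if_pos h3, if_neg (by rw [hk]; exact Bool.false_ne_true)]
        exact h
      · rw [if_neg h3]
        by_cases h4 : (!(text.toList.any PySem.Chars.isalnum)) = true
        · have h4f : text.toList.any PySem.Chars.isalnum = false := by
            rcases hbb : text.toList.any PySem.Chars.isalnum with _ | _
            · rfl
            · rw [hbb] at h4; exact absurd h4 (by simp)
          have hk : pvKeep text etype = false := by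
            simp only [pvKeep, h4f, Bool.false_and, Bool.and_false]
          rw [if_pos h4, if_neg (by rw [hk]; exact Bool.false_ne_true)]
          exact h
        · rw [if_neg h4]
          have h4' : text.toList.any PySem.Chars.isalnum = true := by
            rcases hbb : text.toList.any PySem.Chars.isalnum with _ | _
            · exact absurd (by rw [hbb]; rfl) h4
            · rfl
          by_cases h5 : pvSkipTypes.contains etype = true
          · have hk : pvKeep text etype = false := by
              simp only [pvKeep, h5, Bool.not_true, Bool.and_false]
            rw [if_pos h5, if_neg (by rw [hk]; exact Bool.false_ne_true)]
            exact h
          · have hk : pvKeep text etype = true := by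
              rw [Bool.not_eq_true] at h2 h3 h5
              simp only [pvKeep, hb1, h2, h3, h4', h5, Bool.not_false,
                Bool.and_true]
            rw [if_neg h5, if_pos hk]
            exact pvRel_update d g h e _

theorem pvRel_foldl (l : List (List (String × String)))
    (d : PySem.Dict String (List (String × String)))
    (g : PySem.Dict String (List (List (String × String))))
    (h : pvRel d g) : pvRel (l.foldl pvStepA d) (l.foldl pvStepB g) := by
  induction l generalizing d g with
  | nil => exact h
  | cons e t ih =>
    rw [List.foldl_cons, List.foldl_cons]
    exact ih _ _ (pvRel_step d g e h)

-- ===== VERDICT (by name: the statement is the Claim_ definition above) =====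
theorem filter_and_normalize_entities_spec : Claim_equal_filter_and_normalize_entities := by
  intro entities _
  unfold Spec_filter_and_normalize_entities filter_and_normalize_entities filter_and_normalize_entities_alt
  by_cases h : entities = []
  · rw [if_pos h, if_pos h]
  · rw [if_neg h, if_neg h]
    obtain ⟨hitems, -, -⟩ :=
      pvRel_foldl entities PySem.Dict.empty PySem.Dict.empty
        ⟨rfl, List.nodup_nil, fun p hp => by simp [PySem.Dict.empty] at hp⟩
    simp only [PySem.Dict.values, hitems, List.map_map]
    rfl
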